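-- pv_equiv track=rewrite | github.com/FrankTsai1125/Parallelism | finalproject/tools/upgrade_bench_add_total_threads.py | _gpu_total_threads
-- ===== SOURCE A (Python) =====
-- def _ceil_div(a: int, b: int) -> int:
--     return (a + b - 1) // b
--
-- def _gpu_total_threads(total_paths: int, ntasks: int, block_size: int) -> int:
--     # Mirror mc_pricer.cu path split:
--     base = total_paths // ntasks
--     rem = total_paths % ntasks
--     tot = 0
--     for pid in range(ntasks):
--         local = base + (1 if pid < rem else 0)
--         blocks = _ceil_div(local, block_size)
--         tot += blocks * block_size
--     return tot
-- ===== SOURCE B (Python) =====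
-- def _gpu_total_threads(total_paths: int, ntasks: int, block_size: int) -> int:
--     # Closed form: rem tasks get base+1 paths, the rest get base; pad each group once.
--     if ntasks <= 0:
--         return 0
--     base, rem = divmod(total_paths, ntasks)
--     pad_base = (base + block_size - 1) // block_size * block_size
--     pad_big = (base + block_size) // block_size * block_size
--     return rem * pad_big + (ntasks - rem) * pad_base
-- ===== Notes on version B (the rewrite author's own statement) =====
-- stated objective: faster
-- what changed: Replaces the per-task loop with a closed form: the rem tasks holding base+1 paths and the ntasks-rem tasks holding base paths are padded once each and multiplied.
import Mathlib
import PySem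

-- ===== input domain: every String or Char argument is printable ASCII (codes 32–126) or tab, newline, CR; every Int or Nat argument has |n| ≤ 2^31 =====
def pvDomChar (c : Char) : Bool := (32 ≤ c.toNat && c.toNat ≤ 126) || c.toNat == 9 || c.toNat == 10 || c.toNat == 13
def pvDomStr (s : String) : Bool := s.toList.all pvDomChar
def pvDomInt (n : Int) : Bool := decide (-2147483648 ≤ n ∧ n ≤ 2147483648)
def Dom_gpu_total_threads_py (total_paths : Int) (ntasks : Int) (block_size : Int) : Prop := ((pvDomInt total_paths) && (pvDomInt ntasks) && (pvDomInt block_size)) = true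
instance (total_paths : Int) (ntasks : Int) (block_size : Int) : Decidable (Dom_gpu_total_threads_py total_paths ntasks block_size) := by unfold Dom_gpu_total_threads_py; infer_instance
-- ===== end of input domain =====

-- B replaces A's per-task loop by a two-group closed form (faster in a timing run: O(1) vs O(ntasks)).

-- ===== PORT A =====
def ceil_div_py (a : Int) (b : Int) : Int := PySem.Int.floordiv (a + b - 1) b

def gpu_total_threads_py (total_paths : Int) (ntasks : Int) (block_size : Int) : Int :=
  let base := PySem.Int.floordiv total_paths ntasks
  let rem := PySem.Int.mod total_paths ntasks
  (PySem.List.pyRange 0 ntasks 1).foldl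
    (fun tot pid =>
      let lcl := base + (if pid < rem then 1 else 0)
      let blocks := ceil_div_py lcl block_size
      tot + blocks * block_size) 0

-- ===== PORT B =====
def gpu_total_threads_py_alt (total_paths : Int) (ntasks : Int) (block_size : Int) : Int :=
  if ntasks ≤ 0 then 0
  else
    let base := PySem.Int.floordiv total_paths ntasks
    let rem := PySem.Int.mod total_paths ntasks
    let pad_base := PySem.Int.floordiv (base + block_size - 1) block_size * block_size
    let pad_big := PySem.Int.floordiv (base + block_size) block_size * block_size
    rem * pad_big + (ntasks - rem) * pad_base

-- ===== PRECONDITION & SPEC =====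
-- Pre_ excludes exactly the inputs where A raises ZeroDivisionError: ntasks = 0
-- (total_paths // ntasks), and block_size = 0 when the loop runs (ntasks > 0).
def Pre_gpu_total_threads_py (total_paths : Int) (ntasks : Int) (block_size : Int) : Prop :=
  ntasks ≠ 0 ∧ (0 < ntasks → block_size ≠ 0)
instance (total_paths : Int) (ntasks : Int) (block_size : Int) : Decidable (Pre_gpu_total_threads_py total_paths ntasks block_size) := by unfold Pre_gpu_total_threads_py; infer_instance

def pvWitness_gpu_total_threads_py : Int × Int × Int := (10, 3, 4)

def Spec_gpu_total_threads_py (total_paths : Int) (ntasks : Int) (block_size : Int) (out : Int) : Prop := out = gpu_total_threads_py_alt total_paths ntasks block_size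
instance (total_paths : Int) (ntasks : Int) (block_size : Int) (out : Int) : Decidable (Spec_gpu_total_threads_py total_paths ntasks block_size out) := by unfold Spec_gpu_total_threads_py; infer_instance

-- ===== CLAIM (what is proved, stated in full; the proofs are below) =====
def Claim_equal_gpu_total_threads_py : Prop := ∀ (total_paths : Int) (ntasks : Int) (block_size : Int), Dom_gpu_total_threads_py total_paths ntasks block_size → Pre_gpu_total_threads_py total_paths ntasks block_size → Spec_gpu_total_threads_py total_paths ntasks block_size (gpu_total_threads_py total_paths ntasks block_size)


-- ===== LEMMAS AND PROOFS =====

-- A fold that adds a value that is constant on the members of the list.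
lemma foldl_add_const (f : Int → Int) (P : Int) :
    ∀ (l : List Int), (∀ x ∈ l, f x = P) → ∀ init : Int,
      l.foldl (fun t p => t + f p) init = init + l.length * P := by
  intro l
  induction l with
  | nil => intro _ init; simp
  | cons a l ih =>
    intro h init
    simp only [List.foldl_cons, List.length_cons]
    rw [ih (fun x hx => h x (List.mem_cons_of_mem a hx)), h a (List.mem_cons_self)]
    push_cast; ring

lemma loop_closed (base bs r : Int) (n : Int) (hr0 : 0 ≤ r) (hrn : r ≤ n) :
    (PySem.List.pyRange 0 n 1).foldl
      (fun tot pid => tot + ceil_div_py (base + (if pid < r then 1 else 0)) bs * bs) 0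
    = r * (ceil_div_py (base + 1) bs * bs) + (n - r) * (ceil_div_py base bs * bs) := by
  rw [PySem.List.pyRange_one_append 0 r n hr0 hrn, List.foldl_append]
  rw [foldl_add_const (fun pid => ceil_div_py (base + (if pid < r then 1 else 0)) bs * bs)
        (ceil_div_py (base + 1) bs * bs) (PySem.List.pyRange 0 r 1)
        (by intro x hx
            rw [PySem.List.mem_pyRange_one] at hx
            simp [hx.2])]
  rw [foldl_add_const (fun pid => ceil_div_py (base + (if pid < r then 1 else 0)) bs * bs)
        (ceil_div_py base bs * bs) (PySem.List.pyRange r n 1)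
        (by intro x hx
            rw [PySem.List.mem_pyRange_one] at hx
            simp [not_lt.mpr hx.1])]
  rw [PySem.List.length_pyRange_one, PySem.List.length_pyRange_one]
  have h1 : ((r - 0).toNat : Int) = r := by omega
  have h2 : ((n - r).toNat : Int) = n - r := by omega
  rw [h1, h2]; ring

-- ===== VERDICT (by name: the statement is the Claim_ definition above) =====
theorem gpu_total_threads_py_spec : Claim_equal_gpu_total_threads_py := by
  intro tp n bs _ hpre
  unfold Spec_gpu_total_threads_py gpu_total_threads_py gpu_total_threads_py_alt
  rcases hpre with ⟨hn0, _⟩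
  rcases lt_or_gt_of_ne hn0 with hneg | hpos
  · rw [PySem.List.pyRange_one_eq_nil (by omega)]
    simp [le_of_lt hneg]
  · have hr0 : 0 ≤ PySem.Int.mod tp n := PySem.Int.mod_nonneg tp hpos
    have hrn : PySem.Int.mod tp n ≤ n := le_of_lt (PySem.Int.mod_lt tp hpos)
    simp only [not_le.mpr hpos, if_false]
    rw [loop_closed (PySem.Int.floordiv tp n) bs (PySem.Int.mod tp n) n hr0 hrn]
    unfold ceil_div_py
    have : PySem.Int.floordiv tp n + 1 + bs - 1 = PySem.Int.floordiv tp n + bs := by ring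
    rw [this]
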